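-- pv_equiv track=rewrite | github.com/lirrensi/swarmkeeper | swarmkeeper/session/naming.py | generate_agent_name
-- ===== SOURCE A (Python) =====
-- ANIMALS = [
--     "bee",
--     "ant",
--     "wasp",
--     "beetle",
--     "moth",
--     "cricket",
--     "spider",
--     "ladybug",
--     "firefly",
--     "dragonfly",
--     "mantis",
--     "caterpillar",
--     "butterfly",
--     "hornet",
--     "termite",
--     "locust",
--     "cicada",
--     "aphid",
--     "roach",
--     "flea",
--     "gnat",
--     "mite",
-- ]
--
-- def generate_agent_name(existing_names: list[str]) -> str:
--     """Generate unique agent name in format agent-XX-animal.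
--
--     Args:
--         existing_names: List of already taken session names
--
--     Returns:
--         Unique agent name like "agent-01-spider"
--     """
--     # Extract numbers from existing agent names
--     used_numbers = set()
--     for name in existing_names:
--         if name.startswith("agent-"):
--             try:
--                 num_part = name.split("-")[1]
--                 if num_part.isdigit():
--                     used_numbers.add(int(num_part))
--             except (IndexError, ValueError):
--                 continue
--
--     # Find next available number starting from 1
--     counter = 1
--     while counter in used_numbers:
--         counter += 1
--
--     # Select animal based on counter (cycles through animals)
--     animal_index = (counter - 1) % len(ANIMALS)
--     animal = ANIMALS[animal_index]
--
--     return f"agent-{counter:02d}-{animal}"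
-- ===== SOURCE B (Python) =====
-- ANIMALS = [
--     "bee", "ant", "wasp", "beetle", "moth", "cricket", "spider", "ladybug",
--     "firefly", "dragonfly", "mantis", "caterpillar", "butterfly", "hornet",
--     "termite", "locust", "cicada", "aphid", "roach", "flea", "gnat", "mite",
-- ]
--
--
-- def _parse_num(name):
--     """Number taken by an agent name, or None."""
--     if not name.startswith("agent-"):
--         return None
--     part = name.split("-")[1]
--     return int(part) if part.isdigit() else None
--
--
-- def generate_agent_name(existing_names: list) -> str:
--     # sorted distinct taken numbers, then a single gap-walk for the
--     # smallest free number >= 1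
--     nums = sorted({n for name in existing_names
--                    if (n := _parse_num(name)) is not None})
--     counter = 1
--     for v in nums:
--         if v < counter:
--             continue
--         if v == counter:
--             counter += 1
--         else:
--             break
--     animal = ANIMALS[(counter - 1) % len(ANIMALS)]
--     return f"agent-{counter:02d}-{animal}"
-- ===== Notes on version B (the rewrite author's own statement) =====
-- stated objective: alternative
-- what changed: Replaces A's set-membership while-loop (probe 1,2,3,... against the used-number set) by sorting the distinct parsed numbers once and finding the smallest free number >= 1 with a single gap-walk over the sorted list; parsing becomes a helper returning Optional[int] feeding a set comprehension.
import Mathlib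
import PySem

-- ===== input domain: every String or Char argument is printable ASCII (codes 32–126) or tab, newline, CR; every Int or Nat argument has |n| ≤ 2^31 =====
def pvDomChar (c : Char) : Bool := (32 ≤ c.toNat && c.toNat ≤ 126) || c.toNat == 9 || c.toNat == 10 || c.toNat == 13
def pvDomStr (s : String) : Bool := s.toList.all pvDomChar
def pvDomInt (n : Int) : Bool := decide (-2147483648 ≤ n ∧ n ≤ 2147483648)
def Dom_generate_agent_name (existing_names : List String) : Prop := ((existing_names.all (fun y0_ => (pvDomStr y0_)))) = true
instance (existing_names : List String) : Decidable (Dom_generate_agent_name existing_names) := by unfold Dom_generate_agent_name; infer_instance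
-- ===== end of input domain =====

-- B replaces A's unbounded while-loop probe of the used-number set by one gap-walk
-- over the sorted distinct parsed numbers (objective: alternative decomposition).

-- ===== PORT A =====
def pvAnimals : List String := [
  "bee", "ant", "wasp", "beetle", "moth", "cricket", "spider", "ladybug",
  "firefly", "dragonfly", "mantis", "caterpillar", "butterfly", "hornet",
  "termite", "locust", "cicada", "aphid", "roach", "flea", "gnat", "mite"]

-- f"agent-{counter:02d}-{animal}" (identical in both Pythons); exact: zfill = the 02d pad
def pvFormat (counter : Int) (animal : String) : String :=
  "agent-" ++ PySem.Str.zfill (PySem.Int.toStr counter) 2 ++ "-" ++ animal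

-- the body of A's collection loop
def pvCollectA (s : PySem.Set Int) (name : String) : PySem.Set Int :=
  if PySem.Str.startswith name "agent-" then
    match PySem.List.pyGet? ((PySem.Str.split? name "-").getD []) 1 with
    | none => s                               -- except IndexError: continue
    | some num_part =>
      if PySem.Str.strIsdigit num_part then
        match PySem.Int.ofStr? num_part with
        | some n => PySem.Set.add s n
        | none => s                           -- except ValueError: continue
      else s
  else s

-- termination helper for the while-loop (cited by decreasing_by below)
theorem pvFilter_le (s : List Int) (c : Int) :
    (s.filter (fun x => decide (c < x))).length ≤ (s.filter (fun x => decide (c ≤ x))).length := by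
  induction s with
  | nil => simp
  | cons a t ih =>
    rw [List.filter_cons, List.filter_cons]
    by_cases h1 : c < a <;> by_cases h2 : c ≤ a <;> simp [h1, h2] <;> omega

theorem pvFilter_lt (s : List Int) (c : Int) (h : c ∈ s) :
    (s.filter (fun x => decide (c < x))).length < (s.filter (fun x => decide (c ≤ x))).length := by
  induction s with
  | nil => cases h
  | cons a t ih =>
    rw [List.filter_cons, List.filter_cons]
    by_cases he : a = c
    · subst he
      have := pvFilter_le t a
      simp only [lt_irrefl, decide_false, Bool.false_eq_true, if_false, le_refl,
        decide_true, if_true, List.length_cons]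
      omega
    · have hm : c ∈ t := by
        rcases List.mem_cons.mp h with h' | h'
        · exact absurd h'.symm he
        · exact h'
      have := ih hm
      by_cases h1 : c < a <;> by_cases h2 : c ≤ a <;> simp [h1, h2] <;> omega

-- while counter in used_numbers: counter += 1
def pvFindCounter (s : PySem.Set Int) (counter : Int) : Int :=
  if PySem.Set.contains s counter then pvFindCounter s (counter + 1) else counter
termination_by (s.filter (fun x => decide (counter ≤ x))).length
decreasing_by
  have he : (fun x : Int => decide (counter + 1 ≤ x)) = (fun x => decide (counter < x)) := by
    funext x; simp only [decide_eq_decide]; omega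
  rw [he]
  exact pvFilter_lt s counter ((PySem.Set.contains_iff s counter).mp (by assumption))

def generate_agent_name (existing_names : List String) : String :=
  let used_numbers := existing_names.foldl pvCollectA PySem.Set.empty
  let counter := pvFindCounter used_numbers 1
  let animal_index := PySem.Int.mod (counter - 1) (pvAnimals.length : Int)
  let animal := (PySem.List.pyGet? pvAnimals animal_index).getD ""  -- index is in range, IndexError unreachable
  pvFormat counter animal

-- ===== PORT B =====
def pvParseNum (name : String) : Option Int :=
  if PySem.Str.startswith name "agent-" then
    match PySem.List.pyGet? ((PySem.Str.split? name "-").getD []) 1 with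
    | none => none                            -- IndexError unreachable: name contains "-"
    | some part =>
      if PySem.Str.strIsdigit part then PySem.Int.ofStr? part  -- ValueError unreachable on ASCII digits
      else none
  else none

-- the gap-walk over the sorted distinct numbers
def pvWalk (counter : Int) : List Int → Int
  | [] => counter
  | v :: rest =>
    if v < counter then pvWalk counter rest
    else if v = counter then pvWalk (counter + 1) rest
    else counter

def generate_agent_name_alt (existing_names : List String) : String :=
  let nums := PySem.List.sorted (PySem.Set.ofList (existing_names.filterMap pvParseNum)) (fun x => x)
  let counter := pvWalk 1 nums
  let animal := (PySem.List.pyGet? pvAnimals (PySem.Int.mod (counter - 1) (pvAnimals.length : Int))).getD ""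
  pvFormat counter animal

-- ===== PRECONDITION & SPEC =====
def Spec_generate_agent_name (existing_names : List String) (out : String) : Prop := out = generate_agent_name_alt existing_names
instance (existing_names : List String) (out : String) : Decidable (Spec_generate_agent_name existing_names out) := by unfold Spec_generate_agent_name; infer_instance

-- ===== CLAIM (what is proved, stated in full; the proofs are below) =====
def Claim_equal_generate_agent_name : Prop := ∀ (existing_names : List String), Dom_generate_agent_name existing_names → Spec_generate_agent_name existing_names (generate_agent_name existing_names)

-- ===== LEMMAS AND PROOFS =====

-- "r is the first number ≥ c not in S"
def pvIsMex (S : List Int) (c r : Int) : Prop := c ≤ r ∧ r ∉ S ∧ ∀ m, c ≤ m → m < r → m ∈ S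

theorem pvFindCounter_isMex (s : PySem.Set Int) (c : Int) : pvIsMex s c (pvFindCounter s c) := by
  fun_induction pvFindCounter s c with
  | case1 c h ih =>
    obtain ⟨h1, h2, h3⟩ := ih
    refine ⟨by omega, h2, fun m hm1 hm2 => ?_⟩
    by_cases hmc : m = c + 1 ∨ c + 1 ≤ m
    · rcases hmc with rfl | hle
      · exact h3 _ le_rfl hm2
      · exact h3 _ hle hm2
    · have hmc' : m = c := by omega
      rw [hmc']
      exact (PySem.Set.contains_iff s c).mp h
  | case2 c h =>
    refine ⟨le_rfl, fun hc => ?_, fun m hm1 hm2 => absurd hm2 (by omega)⟩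
    exact h ((PySem.Set.contains_iff s c).mpr hc)

theorem pvWalk_isMex (l : List Int) : ∀ c : Int, l.Pairwise (· < ·) → pvIsMex l c (pvWalk c l) := by
  induction l with
  | nil =>
    intro c _
    refine ⟨le_of_eq rfl, by simp [pvWalk], fun m h1 h2 => ?_⟩
    simp only [pvWalk] at h2
    omega
  | cons v rest ih =>
    intro c hs
    have hrest := (List.pairwise_cons.mp hs).2
    have hall := (List.pairwise_cons.mp hs).1
    by_cases h1 : v < c
    · rw [pvWalk, if_pos h1]
      obtain ⟨g1, g2, g3⟩ := ih c hrest
      refine ⟨g1, ?_, fun m hm1 hm2 => List.mem_cons_of_mem _ (g3 m hm1 hm2)⟩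
      simp only [List.mem_cons, not_or]
      exact ⟨by omega, g2⟩
    · by_cases h2 : v = c
      · rw [pvWalk, if_neg h1, if_pos h2]
        obtain ⟨g1, g2, g3⟩ := ih (c + 1) hrest
        refine ⟨by omega, ?_, fun m hm1 hm2 => ?_⟩
        · simp only [List.mem_cons, not_or]
          exact ⟨by omega, g2⟩
        · by_cases hm : m = c
          · subst hm; subst h2; exact List.mem_cons_self
          · exact List.mem_cons_of_mem _ (g3 m (by omega) hm2)
      · rw [pvWalk, if_neg h1, if_neg h2]
        refine ⟨le_of_eq rfl, ?_, fun m hm1 hm2 => absurd hm2 (by omega)⟩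
        simp only [List.mem_cons, not_or]
        exact ⟨fun hc => h2 hc.symm, fun hc => by have := hall c hc; omega⟩

theorem pvMex_unique {S T : List Int} {c r1 r2 : Int}
    (hmem : ∀ x, x ∈ S ↔ x ∈ T) (h1 : pvIsMex S c r1) (h2 : pvIsMex T c r2) : r1 = r2 := by
  obtain ⟨a1, a2, a3⟩ := h1
  obtain ⟨b1, b2, b3⟩ := h2
  by_contra hne
  rcases lt_or_gt_of_ne hne with hlt | hgt
  · exact a2 ((hmem r1).mpr (b3 r1 a1 hlt))
  · exact b2 ((hmem r2).mp (a3 r2 b1 hgt))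

theorem pvCollectA_mem (s : PySem.Set Int) (name : String) (x : Int) :
    x ∈ pvCollectA s name ↔ x ∈ s ∨ pvParseNum name = some x := by
  unfold pvCollectA pvParseNum
  by_cases h1 : PySem.Str.startswith name "agent-" <;> simp only [h1, if_true]
  · cases hp : PySem.List.pyGet? ((PySem.Str.split? name "-").getD []) 1 with
    | none => simp
    | some p =>
      by_cases h2 : PySem.Str.strIsdigit p <;> simp only [h2, if_true]
      · cases ho : PySem.Int.ofStr? p with
        | none => simp
        | some n => rw [PySem.Set.mem_add]; simp [eq_comm]
      · simp
  · simp

theorem pvFold_mem (names : List String) (s : PySem.Set Int) (x : Int) :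
    x ∈ names.foldl pvCollectA s ↔ x ∈ s ∨ x ∈ names.filterMap pvParseNum := by
  induction names generalizing s with
  | nil => simp
  | cons a t ih =>
    rw [List.foldl_cons, ih, pvCollectA_mem]
    cases hp : pvParseNum a with
    | none => simp [hp]
    | some n => simp [hp, or_assoc, eq_comm]

-- ===== VERDICT (by name: the statement is the Claim_ definition above) =====
theorem generate_agent_name_spec : Claim_equal_generate_agent_name := by
  intro names _
  unfold Spec_generate_agent_name generate_agent_name generate_agent_name_alt
  have hmem : ∀ x, x ∈ names.foldl pvCollectA PySem.Set.empty ↔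
      x ∈ PySem.List.sorted (PySem.Set.ofList (names.filterMap pvParseNum)) (fun x => x) := by
    intro x
    rw [pvFold_mem, PySem.List.mem_sorted, PySem.Set.mem_ofList]
    simp [PySem.Set.empty]
  have hA := pvFindCounter_isMex (names.foldl pvCollectA PySem.Set.empty) 1
  have hB := pvWalk_isMex (PySem.List.sorted (PySem.Set.ofList (names.filterMap pvParseNum)) (fun x => x)) 1
    (PySem.List.sorted_ofList_pairwise_lt _)
  have := pvMex_unique hmem hA hB
  simp only [this]
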